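-- pv_equiv track=rewrite | github.com/mudouasenha/python-exercises | ex23.py | copy_first_2_characters
-- ===== SOURCE A (Python) =====
-- def copy_first_2_characters(str, n):
--     new_str = ""
--     for i in range(n):
--         if len(str) <= 2:
--             new_str = new_str + str
--         else:
--             new_str = new_str + str[:2]
--     return new_str
-- ===== SOURCE B (Python) =====
-- def copy_first_2_characters(str, n):
--     unit = str if len(str) <= 2 else str[:2]
--     return unit * n
-- ===== Notes on version B (the rewrite author's own statement) =====
-- stated objective: simpler
-- what changed: Replaces the per-iteration loop accumulation with a closed-form expression: pick the repeating unit once (the whole string if len<=2 else its first two characters) and repeat it with string multiplication.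
import Mathlib
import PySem

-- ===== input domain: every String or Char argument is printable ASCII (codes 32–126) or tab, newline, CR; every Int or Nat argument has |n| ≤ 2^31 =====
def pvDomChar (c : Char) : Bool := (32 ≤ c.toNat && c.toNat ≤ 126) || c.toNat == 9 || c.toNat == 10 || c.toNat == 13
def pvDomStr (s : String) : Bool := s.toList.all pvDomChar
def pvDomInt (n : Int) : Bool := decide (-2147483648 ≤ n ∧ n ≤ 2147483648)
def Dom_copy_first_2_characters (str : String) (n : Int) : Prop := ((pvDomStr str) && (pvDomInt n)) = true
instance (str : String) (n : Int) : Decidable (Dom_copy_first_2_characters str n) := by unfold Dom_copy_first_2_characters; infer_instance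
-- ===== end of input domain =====

-- B replaces A's per-iteration accumulation loop by a closed form: select the repeating
-- unit once (the whole string if len<=2, else the first two characters) and repeat it n times.


-- ===== PORT A =====
-- loop 'for i in range(n)' appending 'str' or 'str[:2]' each iteration; strings handled
-- as their code-point lists (PySem.Chars), exact on the stated ASCII domain
def copy_first_2_characters (str : String) (n : Int) : String :=
  String.ofList <|
    (PySem.List.pyRange 0 n 1).foldl
      (fun new_str _ =>
        if PySem.Str.len str ≤ 2 then new_str ++ str.toList
        else new_str ++ PySem.List.slice str.toList none (some 2))
      []

-- ===== PORT B =====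
-- unit = str if len(str) <= 2 else str[:2]; return unit * n  (Python string repetition:
-- n.toNat copies, empty for n <= 0)
def copy_first_2_characters_alt (str : String) (n : Int) : String :=
  let unit : List Char :=
    if PySem.Str.len str ≤ 2 then str.toList
    else PySem.List.slice str.toList none (some 2)
  String.ofList (List.replicate n.toNat unit).flatten

-- ===== PRECONDITION & SPEC =====
def Spec_copy_first_2_characters (str : String) (n : Int) (out : String) : Prop := out = copy_first_2_characters_alt str n
instance (str : String) (n : Int) (out : String) : Decidable (Spec_copy_first_2_characters str n out) := by unfold Spec_copy_first_2_characters; infer_instance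

-- ===== CLAIM (what is proved, stated in full; the proofs are below) =====
def Claim_equal_copy_first_2_characters : Prop := ∀ (str : String) (n : Int), Dom_copy_first_2_characters str n → Spec_copy_first_2_characters str n (copy_first_2_characters str n)

-- ===== LEMMAS AND PROOFS =====

-- ===== VERDICT (by name: the statement is the Claim_ definition above) =====
theorem copy_first_2_characters_spec : Claim_equal_copy_first_2_characters := by
  intro str n _
  unfold Spec_copy_first_2_characters copy_first_2_characters copy_first_2_characters_alt
  by_cases h : PySem.Str.len str ≤ 2
  · simp only [if_pos h]
    simp
  · simp only [if_neg h]
    simp
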